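-- pv_equiv track=rewrite | github.com/pengu6/CPSC2030 | semester 1/lab 8.py | is_comment
-- ===== SOURCE A (Python) =====
-- def is_comment(line):
--     """Return True if a line is a comment
--
--     Comments start with `#`, but whitespace may precede that character
--
--     :param line: String representing a line of text
--     :return: Boolean that will be True if line is a comment
--     """
--     if "#" in line:
--         if line.startswith("#") == True:
--             return True
--         else:
--             for char in line:
--                 if char.isalnum() == True:
--                     return False
--                 elif char.isspace() == True:
--                     pass
--                 elif char == "#":
--                     return True
--     else:
--         return False
-- ===== SOURCE B (Python) =====
-- def is_comment(line):
--     """Return True if a line is a comment (whitespace/punctuation may precede '#')."""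
--     filtered = ''.join(c for c in line if c.isalnum() or c == '#')
--     return filtered.startswith('#')
-- ===== Notes on version B (the rewrite author's own statement) =====
-- stated objective: simpler
-- what changed: Replaces A's '#'-containment precheck, startswith special case and branchy early-exit scan with a single filter of the significant characters (alnum or '#') followed by one startswith test.
import Mathlib
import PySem

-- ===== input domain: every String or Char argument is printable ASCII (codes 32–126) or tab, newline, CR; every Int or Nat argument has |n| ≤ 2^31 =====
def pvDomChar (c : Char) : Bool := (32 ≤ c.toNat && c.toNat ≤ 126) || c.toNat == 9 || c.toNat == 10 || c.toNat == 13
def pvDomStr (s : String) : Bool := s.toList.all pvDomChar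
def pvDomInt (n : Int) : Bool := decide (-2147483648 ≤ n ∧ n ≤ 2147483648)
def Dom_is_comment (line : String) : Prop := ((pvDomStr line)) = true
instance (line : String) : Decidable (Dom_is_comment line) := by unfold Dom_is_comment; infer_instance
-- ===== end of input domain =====

-- B replaces A's containment precheck + startswith special case + branchy early-exit scan
-- by filtering the significant characters (alnum or '#') and one startswith test (objective: simpler).


-- ===== PORT A =====
-- the `for char in line:` loop: alnum → False, whitespace → pass, '#' → True,
-- any other char matches no branch (there is no else) and the loop continues;
-- falling off the end of the loop would return None (unreachable: '#' is in the line)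
def isCommentLoop (l : List Char) : Option Bool :=
  match l with
  | [] => none
  | c :: rest =>
    if PySem.Chars.isalnum c then some false
    else if PySem.Chars.isspace c then isCommentLoop rest
    else if c == '#' then some true
    else isCommentLoop rest

def is_comment (line : String) : Option Bool :=
  if PySem.Str.isIn "#" line then
    if PySem.Str.startswith line "#" then some true
    else isCommentLoop line.toList
  else some false

-- ===== PORT B =====
def is_comment_alt (line : String) : Option Bool :=
  let filtered : String :=
    String.ofList (line.toList.filter (fun c => PySem.Chars.isalnum c || c == '#'))
  some (PySem.Str.startswith filtered "#")

-- ===== PRECONDITION & SPEC =====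
def Spec_is_comment (line : String) (out : Option Bool) : Prop := out = is_comment_alt line
instance (line : String) (out : Option Bool) : Decidable (Spec_is_comment line out) := by unfold Spec_is_comment; infer_instance

-- ===== CLAIM (what is proved, stated in full; the proofs are below) =====
def Claim_equal_is_comment : Prop := ∀ (line : String), Dom_is_comment line → Spec_is_comment line (is_comment line)

-- ===== LEMMAS AND PROOFS =====

-- the significant-character predicate of B
def pvSig (c : Char) : Bool := PySem.Chars.isalnum c || c == '#'

lemma pv_alnum_ne_hash {c : Char} (h : PySem.Chars.isalnum c = true) : c ≠ '#' := by
  rintro rfl; exact absurd h (by decide)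

lemma pv_space_ne_hash {c : Char} (h : PySem.Chars.isspace c = true) : c ≠ '#' := by
  rintro rfl; exact absurd h (by decide)

-- the early-exit scan of A answers: is the first significant character '#'?
lemma pv_loop_eq (l : List Char) (hmem : '#' ∈ l) :
    isCommentLoop l = some (decide ((l.filter pvSig).head? = some '#')) := by
  induction l with
  | nil => cases hmem
  | cons c rest ih =>
    by_cases hal : PySem.Chars.isalnum c = true
    · have hne := pv_alnum_ne_hash hal
      simp [isCommentLoop, hal, pvSig, hne]
    · by_cases hsp : PySem.Chars.isspace c = true
      · have hne := pv_space_ne_hash hsp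
        have hmem' : '#' ∈ rest := by
          rcases List.mem_cons.mp hmem with h | h
          · exact absurd h.symm hne
          · exact h
        have hp : pvSig c = false := by simp [pvSig, hal]; exact hne
        simp [isCommentLoop, hal, hsp, hp, ih hmem']
      · by_cases hh : c = '#'
        · subst hh
          simp [isCommentLoop, hal, hsp, pvSig]
        · have hmem' : '#' ∈ rest := by
            rcases List.mem_cons.mp hmem with h | h
            · exact absurd h.symm hh
            · exact h
          have hp : pvSig c = false := by simp [pvSig, hal]; exact hh
          simp [isCommentLoop, hal, hsp, hh, hp, ih hmem']

-- startswith with the single-character pattern '#' tests the head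
lemma pv_startswith_head (l : List Char) :
    PySem.Chars.startswith l ['#'] = decide (l.head? = some '#') := by
  cases l with
  | nil => decide
  | cons c rest =>
    by_cases h : c = '#'
    · subst h
      have ht : PySem.Chars.startswith ('#' :: rest) ['#'] = true :=
        (PySem.Chars.startswith_iff _ _).mpr ⟨rest, rfl⟩
      simp [ht]
    · have hf : PySem.Chars.startswith (c :: rest) ['#'] = false := by
        rw [Bool.eq_false_iff]
        intro hc
        obtain ⟨t, ht⟩ := (PySem.Chars.startswith_iff _ _).mp hc
        injection ht with h1 _
        exact h h1.symm
      simp [hf, h, Ne.symm]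

-- ===== VERDICT (by name: the statement is the Claim_ definition above) =====
theorem is_comment_spec : Claim_equal_is_comment := by
  unfold Claim_equal_is_comment
  intro line _
  unfold Spec_is_comment is_comment is_comment_alt
  have hhash : ("#" : String).toList = ['#'] := by decide
  have hsw : PySem.Str.startswith
      (String.ofList (line.toList.filter (fun c => PySem.Chars.isalnum c || c == '#'))) "#"
      = decide ((line.toList.filter pvSig).head? = some '#') := by
    rw [PySem.Str.startswith_eq, String.toList_ofList, hhash, pv_startswith_head]
    rfl
  by_cases hin : PySem.Str.isIn "#" line = true
  · have hmem : '#' ∈ line.toList := by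
      have hi := (PySem.Str.isIn_iff_infix "#" line).mp hin
      rw [hhash] at hi
      exact hi.subset (List.mem_singleton_self '#')
    by_cases hsw0 : PySem.Str.startswith line "#" = true
    · -- line starts with '#': the filtered list also starts with '#'
      have hpre : ['#'] <+: line.toList := by
        have := PySem.Str.startswith_eq line "#"
        rw [hhash] at this
        exact (PySem.Chars.startswith_iff _ _).mp (this ▸ hsw0)
      obtain ⟨t, ht⟩ := hpre
      simp only [hin, hsw0, if_pos, ← ht]
      simp
      exact (PySem.Chars.startswith_iff _ _).mpr ⟨_, rfl⟩
    · simp only [hin, if_pos, hsw0, if_neg, Bool.not_eq_true] at *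
      rw [pv_loop_eq line.toList hmem, hsw]
  · -- no '#' in the line: the filtered list cannot start with '#'
    have hmem : '#' ∉ line.toList := by
      intro hm
      exact hin ((PySem.Str.isIn_iff_infix "#" line).mpr
        (by rw [hhash]; exact (List.singleton_infix_iff '#' line.toList).mpr hm))
    rw [Bool.not_eq_true] at hin
    have hhead : decide ((line.toList.filter pvSig).head? = some '#') = false := by
      rw [decide_eq_false_iff_not]
      intro hh
      exact hmem (List.mem_of_mem_filter (List.mem_of_mem_head? hh))
    have hin' : PySem.Chars.isIn ['#'] line.toList = false := by
      have he := PySem.Str.isIn_eq "#" line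
      rw [hhash] at he
      rw [← he]; exact hin
    simp only [PySem.Str.isIn_eq, PySem.Str.startswith_eq, String.toList_ofList, hhash] at *
    rw [if_neg (by simp [hin'])]
    rw [pv_startswith_head]
    exact congrArg some hhead.symm
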